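-- pv_equiv track=rewrite | github.com/JulienKonstantinov/S2-python | TD/TD3/Ex3.py | supprime
-- ===== SOURCE A (Python) =====
-- def supprime(car, dico):
--     cles_a_supprimer = []
--
--     for clé in dico.keys():
--         if clé[0]==car:
--             cles_a_supprimer.append(clé)
--
--     for clé in cles_a_supprimer:
--         del dico[clé]
-- # Car on ne peut pas modifier un dico en cours de boucle
--     return dico
-- ===== SOURCE B (Python) =====
-- def supprime(car, dico):
--     # Fixpoint loop: repeatedly find the FIRST key starting with car and delete it,
--     # rescanning from the start, until no such key remains.
--     while True:
--         k = next((k for k in dico if k[0] == car), None)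
--         if k is None:
--             return dico
--         del dico[k]
-- ===== Notes on version B (the rewrite author's own statement) =====
-- stated objective: alternative
-- what changed: Replaces A's collect-all-matching-keys-then-delete two-pass by a fixpoint loop that repeatedly rescans the dict for the first matching key and deletes just it, terminating when no key matches.
import Mathlib
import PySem

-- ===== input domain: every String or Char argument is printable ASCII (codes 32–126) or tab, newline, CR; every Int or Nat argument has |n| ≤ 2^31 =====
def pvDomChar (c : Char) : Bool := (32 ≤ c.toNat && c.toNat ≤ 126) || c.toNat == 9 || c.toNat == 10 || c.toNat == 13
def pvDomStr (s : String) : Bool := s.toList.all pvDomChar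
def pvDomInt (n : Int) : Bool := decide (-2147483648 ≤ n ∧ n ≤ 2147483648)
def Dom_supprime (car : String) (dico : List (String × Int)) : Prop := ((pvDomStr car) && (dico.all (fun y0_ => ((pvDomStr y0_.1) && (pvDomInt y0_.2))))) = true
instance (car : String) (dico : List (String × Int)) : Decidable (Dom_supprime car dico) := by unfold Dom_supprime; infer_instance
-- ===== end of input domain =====

-- B replaces A's collect-matching-keys-then-delete two-pass by a fixpoint loop that
-- repeatedly rescans for the first matching key and deletes it (alternative decomposition);
-- equivalence is about the returned value (both Pythons also mutate `dico` to that value).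


-- ===== PORT A =====
-- clé[0] == car : the one-character string clé[0] compared with car (exact on nonempty clé; Pre_ excludes empty keys, where Python raises IndexError)
def pvKeyMatch (car : String) (k : String) : Bool :=
  (PySem.Str.pyGet? k 0).map (fun c => String.ofList [c]) == some car

-- del dico[clé] : remove the (first) entry with that key
def pvDelKey : List (String × Int) → String → List (String × Int)
  | [], _ => []
  | kv :: rest, k => if kv.1 == k then rest else kv :: pvDelKey rest k

def supprime (car : String) (dico : List (String × Int)) : List (String × Int) :=
  let cles_a_supprimer :=
    dico.foldl (fun acc kv => if pvKeyMatch car kv.1 then acc ++ [kv.1] else acc) []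
  cles_a_supprimer.foldl (fun d k => pvDelKey d k) dico

-- ===== PORT B =====
-- next((k for k in dico if k[0] == car), None) : first matching key, if any
def pvFindMatch (car : String) : List (String × Int) → Option String
  | [] => none
  | kv :: rest => if pvKeyMatch car kv.1 then some kv.1 else pvFindMatch car rest

-- termination of the fixpoint loop: deleting a found key shrinks the list
theorem pvFindMatch_mem (car : String) (l : List (String × Int)) (k : String)
    (h : pvFindMatch car l = some k) : k ∈ l.map Prod.fst := by
  induction l with
  | nil => simp [pvFindMatch] at h
  | cons kv rest ih =>
      by_cases hp : pvKeyMatch car kv.1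
      · simp [pvFindMatch, hp] at h; simp [h.symm]
      · simp only [pvFindMatch, hp, Bool.false_eq_true, ite_false] at h
        simp [ih h]

theorem pvDelKey_length_lt (l : List (String × Int)) (k : String)
    (h : k ∈ l.map Prod.fst) : (pvDelKey l k).length < l.length := by
  induction l with
  | nil => simp at h
  | cons kv rest ih =>
      by_cases he : kv.1 == k
      · simp [pvDelKey, he]
      · have : k ∈ rest.map Prod.fst := by
          rcases List.mem_map.1 h with ⟨kv', hmem, hfst⟩
          rcases List.mem_cons.1 hmem with h1 | h1
          · exact absurd (by rw [h1] at hfst; simp [hfst]) he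
          · exact List.mem_map.2 ⟨kv', h1, hfst⟩
        simpa [pvDelKey, he] using Nat.succ_lt_succ (ih this)

-- while True: find first matching key; if none return dico; else delete it and loop
def supprime_alt (car : String) (dico : List (String × Int)) : List (String × Int) :=
  match h : pvFindMatch car dico with
  | none => dico
  | some k => supprime_alt car (pvDelKey dico k)
termination_by dico.length
decreasing_by exact pvDelKey_length_lt dico k (pvFindMatch_mem car dico k h)

-- ===== PRECONDITION & SPEC =====
-- Pre_ excludes (i) an empty key, on which Python A raises IndexError at clé[0], and
-- (ii) duplicate keys, which no Python dict input can have (the list is a dict's items).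
def Pre_supprime (car : String) (dico : List (String × Int)) : Prop :=
  (∀ kv ∈ dico, kv.1 ≠ "") ∧ (dico.map Prod.fst).Nodup
instance (car : String) (dico : List (String × Int)) : Decidable (Pre_supprime car dico) := by unfold Pre_supprime; infer_instance

def pvWitness_supprime : String × (List (String × Int)) := ("a", [("ab", 1), ("bc", 2), ("a", 3)])

def Spec_supprime (car : String) (dico : List (String × Int)) (out : List (String × Int)) : Prop := out = supprime_alt car dico
instance (car : String) (dico : List (String × Int)) (out : List (String × Int)) : Decidable (Spec_supprime car dico out) := by unfold Spec_supprime; infer_instance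

-- ===== CLAIM (what is proved, stated in full; the proofs are below) =====
def Claim_equal_supprime : Prop := ∀ (car : String) (dico : List (String × Int)), Dom_supprime car dico → Pre_supprime car dico → Spec_supprime car dico (supprime car dico)

-- ===== LEMMAS AND PROOFS =====

-- deleting a key different from the head passes over the head
theorem pvDelKey_cons_of_ne (kv : String × Int) (rest : List (String × Int)) (k : String)
    (h : kv.1 ≠ k) : pvDelKey (kv :: rest) k = kv :: pvDelKey rest k := by
  simp [pvDelKey, h]

-- folding deletions whose keys all differ from the head passes over the head
theorem pvFoldDel_cons_of_ne (kv : String × Int) (rest : List (String × Int))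
    (ks : List String) (h : ∀ k ∈ ks, kv.1 ≠ k) :
    ks.foldl (fun d k => pvDelKey d k) (kv :: rest)
      = kv :: ks.foldl (fun d k => pvDelKey d k) rest := by
  induction ks generalizing rest with
  | nil => rfl
  | cons k ks ih =>
      simp only [List.foldl_cons]
      rw [pvDelKey_cons_of_ne kv rest k (h k (by simp))]
      exact ih (pvDelKey rest k) (fun k' hk' => h k' (by simp [hk']))

-- A's invariant: collect-then-delete over a nodup-keyed list equals filtering out p
theorem pvDelete_eq_filter (p : String → Bool) (dico : List (String × Int))
    (hnd : (dico.map Prod.fst).Nodup) :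
    ((dico.filter (fun kv => p kv.1)).map Prod.fst).foldl (fun d k => pvDelKey d k) dico
      = dico.filter (fun kv => !p kv.1) := by
  induction dico with
  | nil => rfl
  | cons kv rest ih =>
      simp only [List.map_cons, List.nodup_cons] at hnd
      by_cases hp : p kv.1
      · simp only [List.filter_cons, hp, if_pos, List.map_cons, List.foldl_cons]
        have hdel : pvDelKey (kv :: rest) kv.1 = rest := by simp [pvDelKey]
        rw [hdel]
        simpa [hp] using ih hnd.2
      · have hne : ∀ k ∈ (rest.filter (fun kv => p kv.1)).map Prod.fst, kv.1 ≠ k := by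
          intro k hk hkeq
          rcases List.mem_map.1 hk with ⟨kv', hkv', hfst⟩
          exact hnd.1 (List.mem_map.2 ⟨kv', List.mem_of_mem_filter hkv', hfst.trans hkeq.symm⟩)
        rw [List.filter_cons_of_neg (by simp [hp]), List.filter_cons_of_pos (by simp [hp]),
          pvFoldDel_cons_of_ne kv rest _ hne, ih hnd.2]

-- a found key matches
theorem pvFindMatch_match (car : String) (l : List (String × Int)) (k : String)
    (h : pvFindMatch car l = some k) : pvKeyMatch car k = true := by
  induction l with
  | nil => simp [pvFindMatch] at h
  | cons kv rest ih =>
      by_cases hp : pvKeyMatch car kv.1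
      · simp [pvFindMatch, hp] at h; simpa [← h]
      · simp only [pvFindMatch, hp, Bool.false_eq_true, ite_false] at h
        exact ih h

-- no found key means nothing matches
theorem pvFindMatch_none (car : String) (l : List (String × Int))
    (h : pvFindMatch car l = none) : ∀ kv ∈ l, pvKeyMatch car kv.1 = false := by
  induction l with
  | nil => simp
  | cons kv rest ih =>
      by_cases hp : pvKeyMatch car kv.1
      · simp [pvFindMatch, hp] at h
      · simp only [pvFindMatch, hp, Bool.false_eq_true, ite_false] at h
        intro kv' hkv'
        rcases List.mem_cons.1 hkv' with h1 | h1
        · simpa [h1] using hp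
        · exact ih h kv' h1

-- deleting a matching key does not change the kept complement
theorem pvFilter_delKey (p : String → Bool) (l : List (String × Int)) (k : String)
    (hk : p k = true) :
    (pvDelKey l k).filter (fun kv => !p kv.1) = l.filter (fun kv => !p kv.1) := by
  induction l with
  | nil => rfl
  | cons kv rest ih =>
      by_cases he : kv.1 == k
      · have : p kv.1 = true := by rw [eq_of_beq he]; exact hk
        simp [pvDelKey, he, this]
      · simp [pvDelKey, he, List.filter_cons, ih]

-- B's invariant: the fixpoint loop computes the complement filter
theorem pvAlt_eq_filter (car : String) (dico : List (String × Int)) :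
    supprime_alt car dico = dico.filter (fun kv => !pvKeyMatch car kv.1) := by
  induction hL : dico.length using Nat.strong_induction_on generalizing dico with
  | _ n ih =>
      rw [supprime_alt]
      cases h : pvFindMatch car dico with
      | none =>
          have := pvFindMatch_none car dico h
          exact (List.filter_eq_self.2 (fun kv hkv => by simp [this kv hkv])).symm
      | some k =>
          have hlt : (pvDelKey dico k).length < dico.length :=
            pvDelKey_length_lt dico k (pvFindMatch_mem car dico k h)
          simp only []
          rw [ih (pvDelKey dico k).length (hL ▸ hlt) _ rfl,
            pvFilter_delKey _ _ _ (pvFindMatch_match car dico k h)]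

-- ===== VERDICT (by name: the statement is the Claim_ definition above) =====
theorem supprime_spec : Claim_equal_supprime := by
  intro car dico _hdom hpre
  unfold Spec_supprime supprime
  dsimp only
  have hcoll := PySem.List.foldl_append_if (fun kv : String × Int => pvKeyMatch car kv.1)
    (fun kv : String × Int => kv.1) dico ([] : List String)
  rw [hcoll]
  simp only [List.nil_append]
  rw [pvDelete_eq_filter (pvKeyMatch car) dico hpre.2, pvAlt_eq_filter]
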